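-- pv_equiv track=rewrite | github.com/pypi-data/pypi-mirror-404 | packages/bossanova/bossanova-0.1.0.dev4.tar.gz/bossanova-0.1.0.dev4/bossanova/viz/layout.py | _compute_marginality
-- ===== SOURCE A (Python) =====
-- def _compute_marginality(terms: list[str]) -> dict[str, set[str]]:
--     """Compute marginality requirements for each term.
--
--     An interaction term requires all its component main effects.
--     E.g., x1:x2 requires {x1, x2}
--           x1:x2:x3 requires {x1, x2, x3, x1:x2, x1:x3, x2:x3}
--     """
--     marginality: dict[str, set[str]] = {}
--
--     for term in terms:
--         if ":" not in term:
--             marginality[term] = set()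
--             continue
--
--         # Interaction term
--         components = term.split(":")
--         required = set()
--
--         # Add all main effects
--         for c in components:
--             if c in terms:
--                 required.add(c)
--
--         # Add all lower-order interactions
--         if len(components) > 2:
--             from itertools import combinations
--
--             for r in range(2, len(components)):
--                 for combo in combinations(components, r):
--                     lower_interaction = ":".join(sorted(combo))
--                     if lower_interaction in terms:
--                         required.add(lower_interaction)
--
--         marginality[term] = required
--
--     return marginality
-- ===== SOURCE B (Python) =====
-- def _collect(comps, size, chosen, req, term_set):
--     if size == 0:
--         cand = ":".join(sorted(chosen))
--         if cand in term_set: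
--             req.add(cand)
--         return
--     if len(comps) < size:
--         return
--     _collect(comps[1:], size - 1, chosen + [comps[0]], req, term_set)
--     _collect(comps[1:], size, chosen, req, term_set)
--
--
-- def _required(term, term_set):
--     comps = term.split(":")
--     req = {c for c in comps if c in term_set}
--     for size in range(2, len(comps)):
--         _collect(comps, size, [], req, term_set)
--     return req
--
--
-- def _compute_marginality(terms: list[str]) -> dict[str, set[str]]:
--     term_set = set(terms)
--     return {t: (_required(t, term_set) if ":" in t else set()) for t in terms}
-- ===== Notes on version B (the rewrite author's own statement) =====
-- stated objective: alternative
-- what changed: B precomputes set(terms) once and does all membership tests against it, and replaces itertools.combinations with a hand-written structural recursion that threads the result set while extending a chosen prefix; the dict is built by a comprehension over a per-term helper.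
import Mathlib
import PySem

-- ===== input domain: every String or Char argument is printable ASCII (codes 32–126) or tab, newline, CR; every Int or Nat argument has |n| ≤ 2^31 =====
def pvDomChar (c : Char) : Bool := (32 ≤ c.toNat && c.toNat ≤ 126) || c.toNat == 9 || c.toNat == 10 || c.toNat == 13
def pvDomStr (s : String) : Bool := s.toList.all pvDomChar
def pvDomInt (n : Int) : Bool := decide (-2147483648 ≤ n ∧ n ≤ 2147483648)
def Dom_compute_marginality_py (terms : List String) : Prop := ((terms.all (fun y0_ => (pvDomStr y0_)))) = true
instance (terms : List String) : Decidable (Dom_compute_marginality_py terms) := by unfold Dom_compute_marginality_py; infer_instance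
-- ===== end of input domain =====

-- B replaces A's per-term scans of the full term list by one precomputed hash set and
-- itertools.combinations by a hand-rolled structural recursion threading the accumulator (objective: alternative).

-- ===== PORT A =====
def compute_marginality_py (terms : List String) : List (String × List String) :=
  (terms.foldl (fun (m : PySem.Dict String (List String)) (term : String) =>
    if !(PySem.Str.isIn ":" term) then m.insert term PySem.Set.empty
    else
      let components := (PySem.Str.split? term ":").getD []
      let required : PySem.Set String := components.foldl
        (fun req c => if terms.contains c then req.add c else req) PySem.Set.empty
      let required :=
        if components.length > 2 then
          (PySem.List.pyRange 2 (components.length : Int) 1).foldl (fun req r =>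
            (PySem.List.combinations components r.toNat).foldl (fun req combo =>
              let lower_interaction := PySem.Str.join ":" (PySem.List.sorted combo (fun x => x))
              if terms.contains lower_interaction then req.add lower_interaction else req) req) required
        else required
      m.insert term required) PySem.Dict.empty).items

-- ===== PORT B =====
def pvCollect (termSet : PySem.Set String) (comps : List String) (size : Nat)
    (chosen : List String) (req : PySem.Set String) : PySem.Set String :=
  match size with
  | 0 =>
    let cand := PySem.Str.join ":" (PySem.List.sorted chosen (fun x => x))
    if termSet.contains cand then req.add cand else req
  | s + 1 =>
    if comps.length < s + 1 then req
    else
      match comps with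
      | [] => req
      | c :: rest => pvCollect termSet rest (s + 1) chosen (pvCollect termSet rest s (chosen ++ [c]) req)
  termination_by comps

def pvRequired (termSet : PySem.Set String) (term : String) : PySem.Set String :=
  let comps := (PySem.Str.split? term ":").getD []
  let req : PySem.Set String := PySem.Set.ofList (comps.filter (fun c => termSet.contains c))
  (PySem.List.pyRange 2 (comps.length : Int) 1).foldl
    (fun req size => pvCollect termSet comps size.toNat [] req) req

def compute_marginality_py_alt (terms : List String) : List (String × List String) :=
  let termSet : PySem.Set String := PySem.Set.ofList terms
  (terms.foldl (fun (m : PySem.Dict String (List String)) t =>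
    m.insert t (if PySem.Str.isIn ":" t then pvRequired termSet t else PySem.Set.empty))
    PySem.Dict.empty).items

-- ===== PRECONDITION & SPEC =====
def Spec_compute_marginality_py (terms : List String) (out : List (String × List String)) : Prop := out = compute_marginality_py_alt terms
instance (terms : List String) (out : List (String × List String)) : Decidable (Spec_compute_marginality_py terms out) := by unfold Spec_compute_marginality_py; infer_instance

-- ===== CLAIM (what is proved, stated in full; the proofs are below) =====
def Claim_equal_compute_marginality_py : Prop := ∀ (terms : List String), Dom_compute_marginality_py terms → Spec_compute_marginality_py terms (compute_marginality_py terms)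

-- ===== LEMMAS AND PROOFS =====

theorem pv_contains_ofList {α : Type} [BEq α] [LawfulBEq α] (xs : List α) (c : α) :
    (PySem.Set.ofList xs).contains c = xs.contains c := by
  rw [PySem.Set.contains_eq_listContains]
  simp [PySem.Set.mem_ofList]

theorem pv_foldl_filter_add {α : Type} [BEq α] (p : α → Bool) (xs : List α) (s : PySem.Set α) :
    xs.foldl (fun req c => if p c then PySem.Set.add req c else req) s
      = (xs.filter p).foldl PySem.Set.add s := by
  induction xs generalizing s with
  | nil => rfl
  | cons x xs ih =>
    by_cases h : p x <;> simp [h, ih]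

theorem pv_collect_eq (ts : PySem.Set String) (comps : List String) (s : Nat)
    (chosen : List String) (req : PySem.Set String) :
    pvCollect ts comps s chosen req =
      (PySem.List.combinations comps s).foldl (fun req combo =>
        let li := PySem.Str.join ":" (PySem.List.sorted (chosen ++ combo) (fun x => x))
        if ts.contains li then PySem.Set.add req li else req) req := by
  induction comps generalizing s chosen req with
  | nil =>
    cases s with
    | zero => simp [pvCollect, PySem.List.combinations_zero]
    | succ s => simp [pvCollect, PySem.List.combinations_nil_succ]
  | cons c rest ih =>
    cases s with
    | zero => simp [pvCollect, PySem.List.combinations_zero]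
    | succ s =>
      rw [pvCollect]
      by_cases h : (c :: rest).length < s + 1
      · rw [PySem.List.combinations_eq_nil_of_length_lt _ h, List.foldl_nil, if_pos h]
      · rw [if_neg h, PySem.List.combinations_cons_succ, List.foldl_append, List.foldl_map]
        rw [ih, ih]
        simp only [← List.append_cons]

theorem pv_main (terms : List String) :
    compute_marginality_py terms = compute_marginality_py_alt terms := by
  unfold compute_marginality_py compute_marginality_py_alt
  refine congrArg PySem.Dict.items ?_
  refine List.foldl_ext _ _ _ (fun m term _ => ?_)
  by_cases hin : PySem.Str.isIn ":" term
  · simp only [hin, Bool.not_true, Bool.false_eq_true, if_false, if_true]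
    refine congrArg (m.insert term) ?_
    unfold pvRequired
    have hmain : ((PySem.Str.split? term ":").getD []).foldl
        (fun req c => if terms.contains c then PySem.Set.add req c else req) PySem.Set.empty
        = PySem.Set.ofList (((PySem.Str.split? term ":").getD []).filter
            (fun c => (PySem.Set.ofList terms).contains c)) := by
      rw [PySem.Set.ofList_eq_foldl, ← pv_foldl_filter_add]
      simp only [pv_contains_ofList]
      rfl
    by_cases hlen : ((PySem.Str.split? term ":").getD []).length > 2
    · simp only [hlen, if_true, hmain]
      refine List.foldl_ext _ _ _ (fun req r _ => ?_)
      rw [pv_collect_eq]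
      refine List.foldl_ext _ _ _ (fun req' combo _ => ?_)
      simp only [List.nil_append, pv_contains_ofList]
    · simp only [hlen, if_false]
      rw [PySem.List.pyRange_one_eq_nil (by omega), List.foldl_nil, hmain]
  · simp only [hin, Bool.not_false, Bool.false_eq_true, if_false, if_true]

-- ===== VERDICT (by name: the statement is the Claim_ definition above) =====
theorem compute_marginality_py_spec : Claim_equal_compute_marginality_py := by
  intro terms _
  exact pv_main terms
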